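-- pv_equiv track=rewrite | github.com/ne-bknn/c_labs | lab_0/test/autotest/generate_test.py | answer
-- ===== SOURCE A (Python) =====
-- def answer(n):
--     s = 0
--     p = 0
--     n = str(n)
--     for c in n:
--         if int(c) % 2 == 1:
--             s += 1
--             if p == 0:
--                 p = int(c)
--             else:
--                 p = p * int(c)
--
--     return s, p
-- ===== SOURCE B (Python) =====
-- def answer(n):
--     # arithmetic digit extraction instead of string traversal
--     s = 0
--     p = 1
--     m = n
--     while m > 0:
--         d = m % 10
--         if d % 2 == 1:
--             s += 1
--             p *= d
--         m //= 10
--     return (s, p) if s else (s, 0)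
-- ===== Notes on version B (the rewrite author's own statement) =====
-- stated objective: alternative
-- what changed: B extracts digits arithmetically with % 10 and // 10 (least-significant first) and multiplies odd digits into a running product started at 1, instead of A's str(n) traversal with the p==0 sentinel; negative n, on which A's int('-') raises ValueError, is excluded by Pre_.
import Mathlib
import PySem

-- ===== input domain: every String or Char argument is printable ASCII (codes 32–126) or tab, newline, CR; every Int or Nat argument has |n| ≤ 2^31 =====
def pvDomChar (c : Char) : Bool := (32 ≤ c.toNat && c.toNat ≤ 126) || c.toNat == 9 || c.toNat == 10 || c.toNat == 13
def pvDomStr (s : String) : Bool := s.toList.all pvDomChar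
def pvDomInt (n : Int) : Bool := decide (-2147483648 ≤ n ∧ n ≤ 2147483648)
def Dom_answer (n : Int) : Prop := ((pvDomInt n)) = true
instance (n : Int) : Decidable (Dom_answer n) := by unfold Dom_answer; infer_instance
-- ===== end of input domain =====

-- B replaces A's str(n) character traversal (with the p==0 sentinel) by arithmetic
-- digit extraction (% 10, // 10) with a product started at 1: an alternative of the
-- same cost, no string conversion.

-- ===== PORT A =====
-- one step of A's for-loop over the characters of str(n); the Option state is
-- none once int(c) has raised ValueError (PySem.Int.ofStr? returns none there)
def pvStepA (acc : Option (Int × Int)) (c : Char) : Option (Int × Int) :=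
  acc.bind fun sp =>
    (PySem.Int.ofStr? (String.ofList [c])).map fun d =>
      if PySem.Int.mod d 2 == 1 then
        (sp.1 + 1, if sp.2 == 0 then d else sp.2 * d)
      else sp

def answer (n : Int) : Int × Int :=
  -- getD is never reached under Pre_answer (no char of str(n) raises for n ≥ 0)
  ((PySem.Int.toChars n).foldl pvStepA (some (0, 0))).getD (0, 0)

-- ===== PORT B =====
-- the while-loop of Source B: while m > 0: d = m % 10; if d % 2 == 1: s += 1; p *= d; m //= 10
def pvLoopB (m s p : Int) : Int × Int :=
  if _h : 0 < m then
    let d := PySem.Int.mod m 10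
    if PySem.Int.mod d 2 == 1 then
      pvLoopB (PySem.Int.floordiv m 10) (s + 1) (p * d)
    else
      pvLoopB (PySem.Int.floordiv m 10) s p
  else (s, p)
termination_by m.toNat
decreasing_by
  all_goals
    rw [PySem.Int.floordiv_eq_ediv_of_pos (by norm_num : (0:Int) < 10)]
    omega

def answer_alt (n : Int) : Int × Int :=
  let sp := pvLoopB n 0 1
  if sp.1 == 0 then (sp.1, 0) else sp

-- ===== PRECONDITION & SPEC =====
-- Pre_ excludes n < 0, on which A raises ValueError (int('-') on the sign character)
def Pre_answer (n : Int) : Prop := 0 ≤ n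
instance (n : Int) : Decidable (Pre_answer n) := by unfold Pre_answer; infer_instance
def pvWitness_answer : Int := 135

def Spec_answer (n : Int) (out : Int × Int) : Prop := out = answer_alt n
instance (n : Int) (out : Int × Int) : Decidable (Spec_answer n out) := by unfold Spec_answer; infer_instance

-- ===== CLAIM (what is proved, stated in full; the proofs are below) =====
def Claim_equal_answer : Prop := ∀ (n : Int), Dom_answer n → Pre_answer n → Spec_answer n (answer n)

-- ===== LEMMAS AND PROOFS =====

-- big-endian decimal digit characters of a natural number, as produced by str(n)
def pvD (n : Nat) : List Char :=
  if _h : n < 10 then [Nat.digitChar n]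
  else pvD (n / 10) ++ [Nat.digitChar (n % 10)]
termination_by n
decreasing_by omega

-- count of odd decimal digits (as an Int)
def pvC (n : Nat) : Int :=
  if n = 0 then 0
  else (if n % 10 % 2 = 1 then 1 else 0) + pvC (n / 10)

-- product of the odd decimal digits (1 if there are none)
def pvP (n : Nat) : Int :=
  if n = 0 then 1
  else (if n % 10 % 2 = 1 then ((n % 10 : Nat) : Int) else 1) * pvP (n / 10)

theorem pvToDigitsCore_acc (f : Nat) : ∀ (n : Nat) (l : List Char),
    Nat.toDigitsCore 10 f n l = Nat.toDigitsCore 10 f n [] ++ l := by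
  induction f with
  | zero => intro n l; simp [Nat.toDigitsCore]
  | succ f ih =>
    intro n l
    simp only [Nat.toDigitsCore]
    by_cases h : n / 10 = 0
    · simp [h]
    · simp only [if_neg h]
      rw [ih (n / 10) ((n % 10).digitChar :: l), ih (n / 10) [(n % 10).digitChar]]
      simp

theorem pvToDigitsCore_eq_pvD (f : Nat) : ∀ (n : Nat), n < f →
    Nat.toDigitsCore 10 f n [] = pvD n := by
  induction f with
  | zero => intro n h; omega
  | succ f ih =>
    intro n h
    simp only [Nat.toDigitsCore]
    by_cases h10 : n < 10
    · have : n / 10 = 0 := by omega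
      rw [pvD]
      simp [this, Nat.mod_eq_of_lt h10, h10]
    · have hne : ¬ n / 10 = 0 := by omega
      simp only [if_neg hne]
      rw [pvToDigitsCore_acc, ih (n / 10) (by omega)]
      conv_rhs => rw [pvD]
      simp [h10]

theorem pvToDigits_eq_pvD (n : Nat) : Nat.toDigits 10 n = pvD n := by
  unfold Nat.toDigits
  exact pvToDigitsCore_eq_pvD (n + 1) n (by omega)

theorem pvP_ne_zero (n : Nat) : pvP n ≠ 0 := by
  induction n using Nat.strong_induction_on with
  | _ n ih =>
    rw [pvP]
    by_cases h0 : n = 0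
    · simp [h0]
    · simp only [if_neg h0]
      have hrec := ih (n / 10) (by omega)
      by_cases hodd : n % 10 % 2 = 1
      · rw [if_pos hodd]
        have : ((n % 10 : Nat) : Int) ≠ 0 := by
          have : n % 10 ≠ 0 := by omega
          exact_mod_cast this
        exact mul_ne_zero this hrec
      · rw [if_neg hodd, one_mul]; exact hrec

theorem pvCnonneg (n : Nat) : 0 ≤ pvC n := by
  induction n using Nat.strong_induction_on with
  | _ n ih =>
    rw [pvC]
    by_cases h0 : n = 0
    · simp [h0]
    · have := ih (n / 10) (by omega)
      by_cases hodd : n % 10 % 2 = 1 <;> simp [h0, hodd] <;> omega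

theorem pvOfStr_digitChar (d : Nat) (h : d < 10) :
    PySem.Int.ofStr? (String.ofList [Nat.digitChar d]) = some ((d : Nat) : Int) := by
  interval_cases d <;> decide

theorem pvStepA_digit (s p : Int) (d : Nat) (h : d < 10) :
    pvStepA (some (s, p)) (Nat.digitChar d) =
      some (if d % 2 = 1 then
              (s + 1, if p = 0 then ((d : Nat) : Int) else p * ((d : Nat) : Int))
            else (s, p)) := by
  simp only [pvStepA, Option.bind_some, pvOfStr_digitChar d h, Option.map_some]
  have hm : PySem.Int.mod ((d : Nat) : Int) 2 = (((d % 2 : Nat) : Nat) : Int) := by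
    exact_mod_cast PySem.Int.mod_natCast d 2
  by_cases hodd : d % 2 = 1
  · simp [hodd, beq_iff_eq]
    omega
  · have h2 : d % 2 = 0 := by omega
    simp [h2]
    omega

theorem pvPone (n : Nat) : pvC n = 0 → pvP n = 1 := by
  induction n using Nat.strong_induction_on with
  | _ n ih =>
    intro h
    by_cases h0 : n = 0
    · rw [pvP, if_pos h0]
    · rw [pvC, if_neg h0] at h
      have hnn := pvCnonneg (n / 10)
      by_cases hodd : n % 10 % 2 = 1
      · rw [if_pos hodd] at h; omega
      · rw [if_neg hodd] at h
        rw [pvP, if_neg h0, if_neg hodd, one_mul]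
        exact ih (n / 10) (by omega) (by omega)

theorem pvFoldA_pvD (n : Nat) : ∀ (s p : Int),
    (pvD n).foldl pvStepA (some (s, p)) =
      some (s + pvC n, if p = 0 then (if pvC n = 0 then 0 else pvP n) else p * pvP n) := by
  induction n using Nat.strong_induction_on with
  | _ n ih =>
    intro s p
    by_cases h10 : n < 10
    · rw [pvD]
      simp only [dif_pos h10, List.foldl_cons, List.foldl_nil]
      rw [pvStepA_digit s p n h10]
      have hm : n % 10 = n := Nat.mod_eq_of_lt h10
      have hd : n / 10 = 0 := Nat.div_eq_of_lt h10
      by_cases hodd : n % 2 = 1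
      · have hn0 : n ≠ 0 := by omega
        have hC : pvC n = 1 := by
          rw [pvC, if_neg hn0, hm, hd, if_pos hodd, pvC]; norm_num
        have hP : pvP n = ((n : Nat) : Int) := by
          rw [pvP, if_neg hn0, hm, hd, if_pos hodd, pvP]; norm_num
        simp [hodd, hC, hP]
      · have hC : pvC n = 0 := by
          by_cases hn0 : n = 0
          · rw [hn0, pvC]; norm_num
          · rw [pvC, if_neg hn0, hm, hd, if_neg hodd, pvC]; norm_num
        have hP : pvP n = 1 := by
          by_cases hn0 : n = 0
          · rw [hn0, pvP]; norm_num
          · rw [pvP, if_neg hn0, hm, hd, if_neg hodd, pvP]; norm_num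
        by_cases hp : p = 0 <;> simp [hodd, hC, hP, hp]
    · rw [pvD]
      simp only [dif_neg h10, List.foldl_append, List.foldl_cons, List.foldl_nil]
      rw [ih (n / 10) (by omega) s p]
      rw [pvStepA_digit _ _ (n % 10) (by omega)]
      have hn0 : n ≠ 0 := by omega
      have hC : pvC n = (if n % 10 % 2 = 1 then 1 else 0) + pvC (n / 10) := by
        rw [pvC]; simp [hn0]
      have hP : pvP n = (if n % 10 % 2 = 1 then ((n % 10 : Nat) : Int) else 1) * pvP (n / 10) := by
        rw [pvP]; simp [hn0]
      have hPne := pvP_ne_zero (n / 10)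
      have hCnn := pvCnonneg (n / 10)
      by_cases hodd : n % 10 % 2 = 1
      · rw [if_pos hodd, hC, hP, if_pos hodd, if_pos hodd]
        simp only [Option.some.injEq, Prod.mk.injEq]
        refine ⟨by ring, ?_⟩
        by_cases hp : p = 0
        · by_cases hc : pvC (n / 10) = 0
          · have h1 : ¬ ((1 : Int) + pvC (n / 10) = 0) := by omega
            rw [hp, if_pos rfl, if_pos rfl, if_pos hc, if_neg h1, pvPone (n / 10) hc]
            simp
          · have h1 : ¬ ((1 : Int) + pvC (n / 10) = 0) := by omega
            rw [hp, if_pos rfl, if_pos rfl, if_neg hc, if_neg hPne, if_neg h1]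
            ring
        · have hpe : p * pvP (n / 10) ≠ 0 := mul_ne_zero hp hPne
          rw [if_neg hp, if_neg hpe, if_neg hp]
          ring
      · rw [if_neg hodd, hC, hP, if_neg hodd, if_neg hodd]
        simp only [zero_add, one_mul]

theorem pvLoopB_natCast (n : Nat) : ∀ (s p : Int),
    pvLoopB ((n : Nat) : Int) s p = (s + pvC n, p * pvP n) := by
  induction n using Nat.strong_induction_on with
  | _ n ih =>
    intro s p
    by_cases h0 : n = 0
    · subst h0
      rw [pvLoopB]
      simp [pvC, pvP]
    · rw [pvLoopB]
      have hpos : (0 : Int) < (n : Int) := by exact_mod_cast Nat.pos_of_ne_zero h0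
      simp only [dif_pos hpos]
      have hm : PySem.Int.mod ((n : Nat) : Int) 10 = ((n % 10 : Nat) : Int) :=
        PySem.Int.mod_natCast n 10
      have hm2 : PySem.Int.mod ((n % 10 : Nat) : Int) 2 = ((n % 10 % 2 : Nat) : Int) :=
        PySem.Int.mod_natCast (n % 10) 2
      have hd : PySem.Int.floordiv ((n : Nat) : Int) 10 = ((n / 10 : Nat) : Int) :=
        PySem.Int.floordiv_natCast n 10
      have hrec := ih (n / 10) (by omega)
      have hC : pvC n = (if n % 10 % 2 = 1 then 1 else 0) + pvC (n / 10) := by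
        rw [pvC]; simp [h0]
      have hP : pvP n = (if n % 10 % 2 = 1 then ((n % 10 : Nat) : Int) else 1) * pvP (n / 10) := by
        rw [pvP]; simp [h0]
      by_cases hodd : n % 10 % 2 = 1
      · have hb : (PySem.Int.mod (PySem.Int.mod ((n : Nat) : Int) 10) 2 == 1) = true := by
          rw [hm, hm2, hodd]; decide
        rw [if_pos hb, hm, hd, hrec, hC, hP, if_pos hodd, if_pos hodd, Prod.mk.injEq]
        constructor <;> ring
      · have h2 : n % 10 % 2 = 0 := by omega
        have hbn : ¬ ((PySem.Int.mod (PySem.Int.mod ((n : Nat) : Int) 10) 2 == 1) = true) := by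
          rw [hm, hm2, h2]; decide
        rw [if_neg hbn, hd, hrec, hC, hP, if_neg hodd, if_neg hodd, Prod.mk.injEq]
        constructor <;> ring

theorem answer_eq (n : Int) (h : 0 ≤ n) :
    answer n = (pvC n.toNat, if pvC n.toNat = 0 then 0 else pvP n.toNat) := by
  obtain ⟨k, rfl⟩ : ∃ k : Nat, n = (k : Int) := ⟨n.toNat, (Int.toNat_of_nonneg h).symm⟩
  unfold answer
  have hch : PySem.Int.toChars ((k : Nat) : Int) = Nat.toDigits 10 k := by
    unfold PySem.Int.toChars
    have hk : ¬ ((k : Int) < 0) := by simp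
    simp [hk]
  rw [hch, pvToDigits_eq_pvD, pvFoldA_pvD k 0 0]
  simp

theorem answer_alt_eq (n : Int) (h : 0 ≤ n) :
    answer_alt n = (pvC n.toNat, if pvC n.toNat = 0 then 0 else pvP n.toNat) := by
  obtain ⟨k, rfl⟩ : ∃ k : Nat, n = (k : Int) := ⟨n.toNat, (Int.toNat_of_nonneg h).symm⟩
  unfold answer_alt
  rw [pvLoopB_natCast k 0 1]
  simp only [zero_add, one_mul, Int.toNat_natCast]
  by_cases hc : pvC k = 0 <;> simp [hc, beq_iff_eq]

-- ===== VERDICT (by name: the statement is the Claim_ definition above) =====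
theorem answer_spec : Claim_equal_answer := by
  intro n _ hpre
  unfold Spec_answer
  rw [answer_eq n hpre, answer_alt_eq n hpre]
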